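-- pv_equiv track=rewrite | github.com/bvandenabbeele/AdventOfCode | 2015/day_03/main.py | part_1
-- ===== SOURCE A (Python) =====
-- def part_1(directions):
--     houses = set()
--     i = 0
--     j = 0
--
--     for d in directions:
--         houses.add((i, j))
--
--         if d == "^":
--             j += 1
--
--         elif d == "v":
--             j -= 1
--
--         elif d == ">":
--             i += 1
--
--         elif d == "<":
--             i -= 1
--
--     return houses
-- ===== SOURCE B (Python) =====
-- def part_1(directions):
--     xs = [0]
--     for d in directions:
--         xs.append(xs[-1] + (d == ">") - (d == "<"))
--     ys = [0]
--     for d in directions: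
--         ys.append(ys[-1] + (d == "^") - (d == "v"))
--     return {p for p, _ in zip(zip(xs, ys), directions)}
-- ===== Notes on version B (the rewrite author's own statement) =====
-- stated objective: alternative
-- what changed: Instead of simulating one position and adding to a set during the pass, B computes the x- and y-coordinates independently as prefix sums of +/-1 deltas in two staged passes, then zips the coordinate lists with the direction string (truncating the final position) and takes the set once at the end.
import Mathlib
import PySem

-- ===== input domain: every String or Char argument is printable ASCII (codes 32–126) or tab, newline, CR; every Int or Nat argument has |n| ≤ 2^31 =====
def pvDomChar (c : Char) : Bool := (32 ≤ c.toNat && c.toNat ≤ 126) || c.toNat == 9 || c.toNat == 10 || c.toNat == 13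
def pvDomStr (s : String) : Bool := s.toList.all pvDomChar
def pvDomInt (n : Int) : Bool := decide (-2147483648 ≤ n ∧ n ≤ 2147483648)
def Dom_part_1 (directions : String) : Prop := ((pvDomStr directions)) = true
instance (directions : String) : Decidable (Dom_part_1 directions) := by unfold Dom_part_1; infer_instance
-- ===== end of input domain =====

-- B computes the x and y coordinates separately as prefix sums in two staged passes
-- and takes the set once at the end, instead of A's single simulation pass with
-- incremental set.add; objective: alternative (same O(n) cost, different decomposition).

-- ===== PORT A =====
-- loop body of A: add current house, then move according to the if/elif chain
def part_1_loop (st : List (Int × Int) × Int × Int) (d : Char) : List (Int × Int) × Int × Int :=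
  let houses := PySem.Set.add st.1 (st.2.1, st.2.2)
  if d == '^' then (houses, st.2.1, st.2.2 + 1)
  else if d == 'v' then (houses, st.2.1, st.2.2 - 1)
  else if d == '>' then (houses, st.2.1 + 1, st.2.2)
  else if d == '<' then (houses, st.2.1 - 1, st.2.2)
  else (houses, st.2.1, st.2.2)

def part_1 (directions : String) : List (Int × Int) :=
  (directions.toList.foldl part_1_loop ([], 0, 0)).1

-- ===== PORT B =====
-- first staged pass of Source B: xs.append(xs[-1] + (d == ">") - (d == "<"))
def part_1_alt_stepX (acc : List Int) (d : Char) : List Int :=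
  acc ++ [(PySem.List.pyGet? acc (-1)).getD 0 +
    ((if d == '>' then (1 : Int) else 0) - (if d == '<' then (1 : Int) else 0))]

-- second staged pass of Source B: ys.append(ys[-1] + (d == "^") - (d == "v"))
def part_1_alt_stepY (acc : List Int) (d : Char) : List Int :=
  acc ++ [(PySem.List.pyGet? acc (-1)).getD 0 +
    ((if d == '^' then (1 : Int) else 0) - (if d == 'v' then (1 : Int) else 0))]

-- xs[-1] never fails in Source B (the list starts as [0]); .getD 0 is unreachable there.
def part_1_alt (directions : String) : List (Int × Int) :=
  let xs := directions.toList.foldl part_1_alt_stepX [(0 : Int)]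
  let ys := directions.toList.foldl part_1_alt_stepY [(0 : Int)]
  -- {p for p, _ in zip(zip(xs, ys), directions)}
  PySem.Set.ofList (((xs.zip ys).zip directions.toList).map Prod.fst)

-- ===== PRECONDITION & SPEC =====
def Spec_part_1 (directions : String) (out : List (Int × Int)) : Prop := out = part_1_alt directions
instance (directions : String) (out : List (Int × Int)) : Decidable (Spec_part_1 directions out) := by unfold Spec_part_1; infer_instance

-- ===== CLAIM (what is proved, stated in full; the proofs are below) =====
def Claim_equal_part_1 : Prop := ∀ (directions : String), Dom_part_1 directions → Spec_part_1 directions (part_1 directions)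

-- ===== LEMMAS AND PROOFS =====

-- per-character deltas
def pvDx (d : Char) : Int := (if d == '>' then 1 else 0) - (if d == '<' then 1 else 0)
def pvDy (d : Char) : Int := (if d == '^' then 1 else 0) - (if d == 'v' then 1 else 0)

-- the common one-step move
def pvStep (d : Char) (p : Int × Int) : Int × Int := (p.1 + pvDx d, p.2 + pvDy d)

-- positions BEFORE each move (what A adds to the set)
def pvTraj : List Char → (Int × Int) → List (Int × Int)
  | [], _ => []
  | c :: l, p => p :: pvTraj l (pvStep c p)

-- running coordinate sums AFTER each move
def pvSums (f : Char → Int) : List Char → Int → List Int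
  | [], _ => []
  | c :: l, x => (x + f c) :: pvSums f l (x + f c)

theorem pvLoopA_eq (h : List (Int × Int)) (p : Int × Int) (c : Char) :
    part_1_loop (h, p) c = (PySem.Set.add h p, pvStep c p) := by
  simp only [part_1_loop, pvStep, pvDx, pvDy]
  split_ifs with h1 h2 h3 h4 <;>
    simp_all [Prod.ext_iff] <;> omega

theorem pvA_fold (l : List Char) : ∀ (h : List (Int × Int)) (p : Int × Int),
    (List.foldl part_1_loop (h, p) l).1 = PySem.Set.update h (pvTraj l p) := by
  induction l with
  | nil => intro h p; rfl
  | cons c l ih =>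
    intro h p
    rw [List.foldl_cons, pvLoopA_eq, ih]
    rfl

theorem pvLast (a : List Int) (x : Int) :
    (PySem.List.pyGet? (a ++ [x]) (-1)).getD 0 = x := by
  rw [PySem.List.pyGet?_neg_one]
  simp

theorem pvStepX_eq (a : List Int) (x : Int) (c : Char) :
    part_1_alt_stepX (a ++ [x]) c = (a ++ [x]) ++ [x + pvDx c] := by
  simp [part_1_alt_stepX, pvLast, pvDx]

theorem pvStepY_eq (a : List Int) (x : Int) (c : Char) :
    part_1_alt_stepY (a ++ [x]) c = (a ++ [x]) ++ [x + pvDy c] := by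
  simp [part_1_alt_stepY, pvDy]

theorem pvFoldX (l : List Char) : ∀ (a : List Int) (x : Int),
    List.foldl part_1_alt_stepX (a ++ [x]) l = (a ++ [x]) ++ pvSums pvDx l x := by
  induction l with
  | nil => intro a x; simp [pvSums]
  | cons c l ih =>
    intro a x
    rw [List.foldl_cons, pvStepX_eq, ih]
    simp [pvSums]

theorem pvFoldY (l : List Char) : ∀ (a : List Int) (x : Int),
    List.foldl part_1_alt_stepY (a ++ [x]) l = (a ++ [x]) ++ pvSums pvDy l x := by
  induction l with
  | nil => intro a x; simp [pvSums]
  | cons c l ih =>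
    intro c' x
    rw [List.foldl_cons, pvStepY_eq, ih]
    simp [pvSums]

-- zipping the two coordinate prefix lists with the directions recovers A's trajectory
theorem pvZipTraj (l : List Char) : ∀ (p : Int × Int),
    (((p.1 :: pvSums pvDx l p.1).zip (p.2 :: pvSums pvDy l p.2)).zip l).map Prod.fst
      = pvTraj l p := by
  induction l with
  | nil => intro p; rfl
  | cons c l ih =>
    intro p
    simp only [pvSums, pvTraj, List.zip_cons_cons, List.map_cons]
    exact congrArg (List.cons (p.1, p.2)) (ih (pvStep c p))

-- ===== VERDICT (by name: the statement is the Claim_ definition above) =====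
theorem part_1_spec : Claim_equal_part_1 := by
  intro directions _
  unfold Spec_part_1 part_1 part_1_alt
  have hx := pvFoldX directions.toList [] 0
  have hy := pvFoldY directions.toList [] 0
  have hz := pvZipTraj directions.toList (0, 0)
  simp only [List.nil_append] at hx hy
  rw [pvA_fold]
  simp only [hx, hy, List.singleton_append]
  rw [hz]
  rfl
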